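-- pv_equiv track=rewrite | github.com/DecoyV01/vrp-system-v4 | uat-archive/hooks/uat-finalizer.py | extract_phases
-- ===== SOURCE A (Python) =====
-- def extract_phases(session):
--     """Extract VERA phases from session steps"""
--     phases = {
--         'verify': {'steps': 0, 'passed': 0},
--         'execute': {'steps': 0, 'passed': 0},
--         'record': {'steps': 0, 'passed': 0},
--         'analyze': {'steps': 0, 'passed': 0}
--     }
--
--     for step in session['steps']:
--         phase = step.get('phase', 'unknown')
--         action = step.get('action', '')
--
--         # Map actions to VERA phases
--         if 'init' in action or phase == 'initialization':
--             vera_phase = 'verify'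
--         elif 'navigate' in action or 'click' in action or 'fill' in action:
--             vera_phase = 'execute'
--         elif 'screenshot' in action or phase == 'recording':
--             vera_phase = 'record'
--         else:
--             vera_phase = 'analyze'
--
--         phases[vera_phase]['steps'] += 1
--         if step.get('status') == 'completed':
--             phases[vera_phase]['passed'] += 1
--
--     return phases
-- ===== SOURCE B (Python) =====
-- def _vera_phase(step):
--     """Classify one step into its VERA phase (same ordered rules as the original)."""
--     phase = step.get('phase', 'unknown')
--     action = step.get('action', '')
--     if 'init' in action or phase == 'initialization':
--         return 'verify'
--     if 'navigate' in action or 'click' in action or 'fill' in action: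
--         return 'execute'
--     if 'screenshot' in action or phase == 'recording':
--         return 'record'
--     return 'analyze'
--
--
-- def extract_phases(session):
--     """Extract VERA phases from session steps"""
--     steps = session['steps']
--     result = {}
--     for ph in ('verify', 'execute', 'record', 'analyze'):
--         grp = [s for s in steps if _vera_phase(s) == ph]
--         result[ph] = {
--             'steps': len(grp),
--             'passed': len([s for s in grp if s.get('status') == 'completed']),
--         }
--     return result
-- ===== Notes on version B (the rewrite author's own statement) =====
-- stated objective: alternative
-- what changed: Replaces A's single pass that increments mutable per-phase counters inside a nested dict with a classify helper plus a per-phase group-then-count pass (filter the steps for each of the four fixed phases, then take lengths).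
import Mathlib
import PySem

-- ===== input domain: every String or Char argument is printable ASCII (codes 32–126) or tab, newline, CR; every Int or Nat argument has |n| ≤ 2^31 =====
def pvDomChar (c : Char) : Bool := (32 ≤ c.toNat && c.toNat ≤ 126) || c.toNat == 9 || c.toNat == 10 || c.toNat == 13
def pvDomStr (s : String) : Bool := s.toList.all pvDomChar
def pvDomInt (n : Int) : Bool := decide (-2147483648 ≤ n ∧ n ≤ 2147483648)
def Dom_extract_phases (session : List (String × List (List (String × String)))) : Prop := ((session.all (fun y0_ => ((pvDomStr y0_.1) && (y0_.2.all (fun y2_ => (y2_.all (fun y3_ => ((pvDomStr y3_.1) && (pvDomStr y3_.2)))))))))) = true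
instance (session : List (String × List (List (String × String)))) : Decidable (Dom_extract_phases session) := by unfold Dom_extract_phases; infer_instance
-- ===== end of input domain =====

-- B replaces A's single pass with mutable per-phase counters by a per-phase group-then-count
-- pass (filter each of the four fixed phases out of the steps, then take lengths);
-- objective: alternative (same cost class, different shape).

-- ===== PORT A =====
-- the body of A's 'for step in session["steps"]' loop, as a named fold step (A's code, line for line)
def pvAStep (phases : PySem.Dict String (PySem.Dict String Int))
    (step : List (String × String)) : PySem.Dict String (PySem.Dict String Int) :=
  let stepd := PySem.Dict.mk step
  let phase := stepd.getD "phase" "unknown"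
  let action := stepd.getD "action" ""
  let vera_phase :=
    if PySem.Str.isIn "init" action || phase == "initialization" then "verify"
    else if PySem.Str.isIn "navigate" action || PySem.Str.isIn "click" action || PySem.Str.isIn "fill" action then "execute"
    else if PySem.Str.isIn "screenshot" action || phase == "recording" then "record"
    else "analyze"
  let phases := phases.modify vera_phase PySem.Dict.empty (fun inner => inner.modify "steps" 0 (· + 1))
  if stepd.get? "status" == some "completed" then
    phases.modify vera_phase PySem.Dict.empty (fun inner => inner.modify "passed" 0 (· + 1))
  else phases

def extract_phases (session : List (String × List (List (String × String)))) : List (String × List (String × Int)) :=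
  match (PySem.Dict.mk session).get? "steps" with
  | none => []   -- Python raises KeyError here; excluded by Pre_
  | some steps =>
    let phases : PySem.Dict String (PySem.Dict String Int) :=
      PySem.Dict.ofList
        [("verify",  PySem.Dict.ofList [("steps", 0), ("passed", 0)]),
         ("execute", PySem.Dict.ofList [("steps", 0), ("passed", 0)]),
         ("record",  PySem.Dict.ofList [("steps", 0), ("passed", 0)]),
         ("analyze", PySem.Dict.ofList [("steps", 0), ("passed", 0)])]
    let final := steps.foldl pvAStep phases
    final.items.map (fun p => (p.1, p.2.items))

-- ===== PORT B =====
-- B's helper _vera_phase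
def pvClassify (step : List (String × String)) : String :=
  let stepd := PySem.Dict.mk step
  let phase := stepd.getD "phase" "unknown"
  let action := stepd.getD "action" ""
  if PySem.Str.isIn "init" action || phase == "initialization" then "verify"
  else if PySem.Str.isIn "navigate" action || PySem.Str.isIn "click" action || PySem.Str.isIn "fill" action then "execute"
  else if PySem.Str.isIn "screenshot" action || phase == "recording" then "record"
  else "analyze"

def extract_phases_alt (session : List (String × List (List (String × String)))) : List (String × List (String × Int)) :=
  match (PySem.Dict.mk session).get? "steps" with
  | none => []   -- Python raises KeyError here; excluded by Pre_
  | some steps =>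
    ["verify", "execute", "record", "analyze"].map (fun ph =>
      let grp := steps.filter (fun s => pvClassify s == ph)
      (ph, [("steps", (grp.length : Int)),
            ("passed", ((grp.filter (fun s => (PySem.Dict.mk s).get? "status" == some "completed")).length : Int))]))

-- ===== PRECONDITION & SPEC =====
-- Pre_ excludes exactly the sessions with no 'steps' key, on which the Python A raises KeyError.
def Pre_extract_phases (session : List (String × List (List (String × String)))) : Prop :=
  "steps" ∈ session.map Prod.fst
instance (session : List (String × List (List (String × String)))) : Decidable (Pre_extract_phases session) := by unfold Pre_extract_phases; infer_instance

def pvWitness_extract_phases : (List (String × List (List (String × String)))) :=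
  [("steps", [[("action", "click"), ("status", "completed")], [("phase", "recording")]])]

def Spec_extract_phases (session : List (String × List (List (String × String)))) (out : List (String × List (String × Int))) : Prop := out = extract_phases_alt session
instance (session : List (String × List (List (String × String)))) (out : List (String × List (String × Int))) : Decidable (Spec_extract_phases session out) := by unfold Spec_extract_phases; infer_instance

-- ===== CLAIM (what is proved, stated in full; the proofs are below) =====
def Claim_equal_extract_phases : Prop := ∀ (session : List (String × List (List (String × String)))), Dom_extract_phases session → Pre_extract_phases session → Spec_extract_phases session (extract_phases session)

-- ===== LEMMAS AND PROOFS =====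

-- the shape of A's accumulator: the four fixed phase dicts with symbolic counters
def mkP (a b c d e f g h : Int) : PySem.Dict String (PySem.Dict String Int) :=
  PySem.Dict.mk [("verify",  PySem.Dict.mk [("steps", a), ("passed", b)]),
                 ("execute", PySem.Dict.mk [("steps", c), ("passed", d)]),
                 ("record",  PySem.Dict.mk [("steps", e), ("passed", f)]),
                 ("analyze", PySem.Dict.mk [("steps", g), ("passed", h)])]

def pvCompleted (s : List (String × String)) : Bool :=
  (PySem.Dict.mk s).get? "status" == some "completed"

-- number of steps of l classified into phase ph / of those additionally completed, as Int
def nS (ph : String) (l : List (List (String × String))) : Int :=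
  ((l.filter (fun s => pvClassify s == ph)).length : Int)
def nP (ph : String) (l : List (List (String × String))) : Int :=
  (((l.filter (fun s => pvClassify s == ph)).filter pvCompleted).length : Int)

lemma pvClassify_cases (s : List (String × String)) :
    pvClassify s = "verify" ∨ pvClassify s = "execute" ∨ pvClassify s = "record" ∨ pvClassify s = "analyze" := by
  unfold pvClassify; dsimp only; split_ifs <;> simp

-- A's loop body, written through B's classifier (the two classification chains are identical code)
lemma pvAStep_eq (phases : PySem.Dict String (PySem.Dict String Int)) (x : List (String × String)) :
    pvAStep phases x =
      (if pvCompleted x then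
        (phases.modify (pvClassify x) PySem.Dict.empty (fun inner => inner.modify "steps" 0 (· + 1))).modify
          (pvClassify x) PySem.Dict.empty (fun inner => inner.modify "passed" 0 (· + 1))
      else phases.modify (pvClassify x) PySem.Dict.empty (fun inner => inner.modify "steps" 0 (· + 1))) := by
  unfold pvAStep pvClassify pvCompleted
  dsimp only

@[simp] lemma mkP_modify_steps_ve (a b c d e f g h : Int) :
    (mkP a b c d e f g h).modify "verify" PySem.Dict.empty (fun inner => inner.modify "steps" 0 (· + 1))
    = mkP (a+1) b c d e f g h := by
  simp [mkP, PySem.Dict.modify, PySem.Dict.getD, PySem.Dict.get?, PySem.Dict.insert, PySem.Dict.contains]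

@[simp] lemma mkP_modify_passed_ve (a b c d e f g h : Int) :
    (mkP a b c d e f g h).modify "verify" PySem.Dict.empty (fun inner => inner.modify "passed" 0 (· + 1))
    = mkP a (b+1) c d e f g h := by
  simp [mkP, PySem.Dict.modify, PySem.Dict.getD, PySem.Dict.get?, PySem.Dict.insert, PySem.Dict.contains]

@[simp] lemma mkP_modify_steps_ex (a b c d e f g h : Int) :
    (mkP a b c d e f g h).modify "execute" PySem.Dict.empty (fun inner => inner.modify "steps" 0 (· + 1))
    = mkP a b (c+1) d e f g h := by
  simp [mkP, PySem.Dict.modify, PySem.Dict.getD, PySem.Dict.get?, PySem.Dict.insert, PySem.Dict.contains]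

@[simp] lemma mkP_modify_passed_ex (a b c d e f g h : Int) :
    (mkP a b c d e f g h).modify "execute" PySem.Dict.empty (fun inner => inner.modify "passed" 0 (· + 1))
    = mkP a b c (d+1) e f g h := by
  simp [mkP, PySem.Dict.modify, PySem.Dict.getD, PySem.Dict.get?, PySem.Dict.insert, PySem.Dict.contains]

@[simp] lemma mkP_modify_steps_re (a b c d e f g h : Int) :
    (mkP a b c d e f g h).modify "record" PySem.Dict.empty (fun inner => inner.modify "steps" 0 (· + 1))
    = mkP a b c d (e+1) f g h := by
  simp [mkP, PySem.Dict.modify, PySem.Dict.getD, PySem.Dict.get?, PySem.Dict.insert, PySem.Dict.contains]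

@[simp] lemma mkP_modify_passed_re (a b c d e f g h : Int) :
    (mkP a b c d e f g h).modify "record" PySem.Dict.empty (fun inner => inner.modify "passed" 0 (· + 1))
    = mkP a b c d e (f+1) g h := by
  simp [mkP, PySem.Dict.modify, PySem.Dict.getD, PySem.Dict.get?, PySem.Dict.insert, PySem.Dict.contains]

@[simp] lemma mkP_modify_steps_an (a b c d e f g h : Int) :
    (mkP a b c d e f g h).modify "analyze" PySem.Dict.empty (fun inner => inner.modify "steps" 0 (· + 1))
    = mkP a b c d e f (g+1) h := by
  simp [mkP, PySem.Dict.modify, PySem.Dict.getD, PySem.Dict.get?, PySem.Dict.insert, PySem.Dict.contains]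

@[simp] lemma mkP_modify_passed_an (a b c d e f g h : Int) :
    (mkP a b c d e f g h).modify "analyze" PySem.Dict.empty (fun inner => inner.modify "passed" 0 (· + 1))
    = mkP a b c d e f g (h+1) := by
  simp [mkP, PySem.Dict.modify, PySem.Dict.getD, PySem.Dict.get?, PySem.Dict.insert, PySem.Dict.contains]

lemma nS_cons (ph : String) (x : List (String × String)) (t : List (List (String × String))) :
    nS ph (x :: t) = (if pvClassify x == ph then 1 else 0) + nS ph t := by
  rcases h : pvClassify x == ph with _ | _ <;>
    simp [nS, h] <;> omega

lemma nP_cons (ph : String) (x : List (String × String)) (t : List (List (String × String))) :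
    nP ph (x :: t) = (if (pvClassify x == ph) && pvCompleted x then 1 else 0) + nP ph t := by
  rcases hc : (pvClassify x == ph) with _ | _ <;>
    rcases hp : pvCompleted x with _ | _ <;>
      simp [nP, hc, hp] <;> omega

-- A's whole loop, from a symbolic accumulator: it adds the per-phase counts of the list
lemma foldA (l : List (List (String × String))) (a b c d e f g h : Int) :
    l.foldl pvAStep (mkP a b c d e f g h)
    = mkP (a + nS "verify" l) (b + nP "verify" l) (c + nS "execute" l) (d + nP "execute" l)
          (e + nS "record" l) (f + nP "record" l) (g + nS "analyze" l) (h + nP "analyze" l) := by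
  induction l generalizing a b c d e f g h with
  | nil => simp [nS, nP]
  | cons x t ih =>
    rw [List.foldl_cons, pvAStep_eq]
    rcases pvClassify_cases x with hx | hx | hx | hx <;>
      rcases hp : pvCompleted x with _ | _ <;>
      simp only [hx, hp, Bool.false_eq_true, reduceIte,
        mkP_modify_steps_ve, mkP_modify_passed_ve, mkP_modify_steps_ex, mkP_modify_passed_ex,
        mkP_modify_steps_re, mkP_modify_passed_re, mkP_modify_steps_an, mkP_modify_passed_an,
        ih, nS_cons, nP_cons, Bool.and_true, Bool.and_false, beq_iff_eq,
        String.reduceEq, beq_self_eq_true, reduceIte] <;>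
      (simp [mkP]; omega)

-- ===== VERDICT (by name: the statement is the Claim_ definition above) =====
theorem extract_phases_spec : Claim_equal_extract_phases := by
  intro session _hDom hPre
  unfold Spec_extract_phases extract_phases extract_phases_alt
  cases hs : (PySem.Dict.mk session).get? "steps" with
  | none => rfl
  | some steps =>
    have h0 : (PySem.Dict.ofList
        [("verify",  PySem.Dict.ofList [("steps", (0:Int)), ("passed", 0)]),
         ("execute", PySem.Dict.ofList [("steps", 0), ("passed", 0)]),
         ("record",  PySem.Dict.ofList [("steps", 0), ("passed", 0)]),
         ("analyze", PySem.Dict.ofList [("steps", 0), ("passed", 0)])]) = mkP 0 0 0 0 0 0 0 0 := by decide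
    rw [h0]
    dsimp only
    rw [foldA]
    simp only [zero_add, mkP, nS, nP, pvCompleted, List.map_cons, List.map_nil]
    rfl
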